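-- pv_equiv track=rewrite | github.com/Apparaat9/AOC | 2024/day_21.py | get_pushes
-- ===== SOURCE A (Python) =====
-- numpad = {'7' : (0,0), '8' : (0,1), '9' : (0,2),
--           '4' : (1,0), '5' : (1,1), '6' : (1,2),
--           '1' : (2,0), '2' : (2,1), '3' : (2,2),
--                        '0' : (3,1), 'A' : (3,2)}
--
-- d_pad = {            '^' : (0,1), 'A' : (0,2),
--         '<' : (1,0), 'v' : (1,1), '>' : (1,2)}
--
-- checks = {'<' : (0,-1), '>' : (0,1), '^' : (-1,0), 'v' : (1,0)}
--
-- def get_pushes(current, target, pad):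
--     p = d_pad if pad else numpad
--     hd, vd = map(lambda x : x[0]-x[1], zip(p[current], p[target]))
--     ha = abs(hd) * ('v' if hd < 0 else '^')
--     va = abs(vd) * ('<' if vd > 0 else '>')
--     r = ha + va
--
--     seen = [p[current]]
--     for t in r:
--         seen.append([*map(lambda x : x[0]+x[1], zip(seen[-1], checks[t]))])
--     sk = '>^v<' if (pad and [0,0] in seen) or (not pad and [3,0] in seen) else '<v^>'
--     pushes = ''.join(sorted(r, key=lambda x : sk.index(x)))
--
--     return pushes
-- ===== SOURCE B (Python) =====
-- numpad = {'7' : (0,0), '8' : (0,1), '9' : (0,2),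
--           '4' : (1,0), '5' : (1,1), '6' : (1,2),
--           '1' : (2,0), '2' : (2,1), '3' : (2,2),
--                        '0' : (3,1), 'A' : (3,2)}
--
-- d_pad = {            '^' : (0,1), 'A' : (0,2),
--         '<' : (1,0), 'v' : (1,1), '>' : (1,2)}
--
-- def get_pushes(current, target, pad):
--     p = d_pad if pad else numpad
--     cr, cc = p[current]
--     tr, tc = p[target]
--     vstr = '^' * (cr - tr) if cr >= tr else 'v' * (tr - cr)
--     hstr = '<' * (cc - tc) if cc >= tc else '>' * (tc - cc)
--     br = 0 if pad else 3  # the pad's blank cell is (br, 0)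
--     # does the vertical-first path (rows first, then columns) cross the blank?
--     gap = (cc == 0 and min(cr, tr) <= br <= max(cr, tr)) or \
--           (tr == br and min(cc, tc) <= 0 <= max(cc, tc))
--     hfirst = (hstr.startswith('<')) != gap
--     return hstr + vstr if hfirst else vstr + hstr
-- ===== Notes on version B (the rewrite author's own statement) =====
-- stated objective: simpler
-- what changed: B computes the vertical and horizontal move strings directly, tests gap-crossing with a closed-form condition instead of simulating the path step by step, and concatenates the two strings in the chosen order instead of sorting the combined string by a priority string.
import Mathlib
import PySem

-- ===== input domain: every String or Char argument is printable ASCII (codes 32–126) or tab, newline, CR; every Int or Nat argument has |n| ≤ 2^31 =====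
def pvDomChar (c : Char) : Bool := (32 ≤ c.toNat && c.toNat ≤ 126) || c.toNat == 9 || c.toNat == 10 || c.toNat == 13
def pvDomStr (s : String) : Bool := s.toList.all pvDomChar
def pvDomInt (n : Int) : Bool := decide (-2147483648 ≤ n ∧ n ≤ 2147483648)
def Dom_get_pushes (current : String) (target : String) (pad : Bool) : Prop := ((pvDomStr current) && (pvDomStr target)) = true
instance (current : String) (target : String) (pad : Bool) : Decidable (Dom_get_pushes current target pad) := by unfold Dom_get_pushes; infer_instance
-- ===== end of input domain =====

-- B replaces A's path simulation + priority-string sort by direct branch-and-concatenate of the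
-- two move strings with a closed-form gap test (objective: simpler).

-- ===== PORT A =====
-- the two keypads and the move table, as in the Python module
def pvNumpad : PySem.Dict String (Int × Int) := PySem.Dict.ofList
  [("7",(0,0)), ("8",(0,1)), ("9",(0,2)),
   ("4",(1,0)), ("5",(1,1)), ("6",(1,2)),
   ("1",(2,0)), ("2",(2,1)), ("3",(2,2)),
                ("0",(3,1)), ("A",(3,2))]
def pvDpad : PySem.Dict String (Int × Int) := PySem.Dict.ofList
  [("^",(0,1)), ("A",(0,2)), ("<",(1,0)), ("v",(1,1)), (">",(1,2))]
def pvChecks : PySem.Dict Char (Int × Int) := PySem.Dict.ofList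
  [('<',(0,-1)), ('>',(0,1)), ('^',(-1,0)), ('v',(1,0))]

-- transliteration of A; dict lookups p[current]/p[target] raise KeyError for non-keys, which
-- Pre_get_pushes excludes (the .getD default is never reached inside Pre_).  Python's `seen`
-- mixes the start TUPLE with appended LISTS, so `[0,0] in seen` never matches the start element;
-- inside Pre_ the start is a key position and never the blank, so the uniform pair list is exact.
def get_pushes (current : String) (target : String) (pad : Bool) : String :=
  let p := if pad then pvDpad else pvNumpad
  let cur := (p.get? current).getD (0, 0)
  let tgt := (p.get? target).getD (0, 0)
  let hd := cur.1 - tgt.1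
  let vd := cur.2 - tgt.2
  let ha := List.replicate hd.natAbs (if hd < 0 then 'v' else '^')
  let va := List.replicate vd.natAbs (if vd > 0 then '<' else '>')
  let r := ha ++ va
  let seen := r.foldl
    (fun s t =>
      let last := s.getLast!
      let d := (pvChecks.get? t).getD (0, 0)
      s ++ [(last.1 + d.1, last.2 + d.2)]) [cur]
  let sk := if (pad && seen.contains ((0 : Int), (0 : Int))) ||
               (!pad && seen.contains ((3 : Int), (0 : Int)))
            then ">^v<" else "<v^>"
  let pushes := PySem.List.sorted r (fun x => PySem.Str.find sk (String.singleton x)) false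
  String.mk pushes

-- ===== PORT B =====
-- transliteration of Source B
def get_pushes_alt (current : String) (target : String) (pad : Bool) : String :=
  let p := if pad then pvDpad else pvNumpad
  let c := (p.get? current).getD (0, 0)
  let t := (p.get? target).getD (0, 0)
  let vstr := if t.1 ≤ c.1 then List.replicate (c.1 - t.1).toNat '^'
              else List.replicate (t.1 - c.1).toNat 'v'
  let hstr := if t.2 ≤ c.2 then List.replicate (c.2 - t.2).toNat '<'
              else List.replicate (t.2 - c.2).toNat '>'
  let br : Int := if pad then 0 else 3
  let gap := (c.2 == 0 && decide (min c.1 t.1 ≤ br) && decide (br ≤ max c.1 t.1)) ||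
             (t.1 == br && decide (min c.2 t.2 ≤ 0) && decide ((0 : Int) ≤ max c.2 t.2))
  let hfirst := (hstr.head? == some '<') != gap
  String.mk (if hfirst then hstr ++ vstr else vstr ++ hstr)

-- ===== PRECONDITION & SPEC =====
-- Pre_ excludes exactly the inputs where A raises KeyError: current/target not keys of the chosen pad
def pvNKeys : List String := ["7", "8", "9", "4", "5", "6", "1", "2", "3", "0", "A"]
def pvDKeys : List String := ["^", "A", "<", "v", ">"]
def Pre_get_pushes (current : String) (target : String) (pad : Bool) : Prop :=
  if pad then current ∈ pvDKeys ∧ target ∈ pvDKeys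
  else current ∈ pvNKeys ∧ target ∈ pvNKeys
instance (current : String) (target : String) (pad : Bool) : Decidable (Pre_get_pushes current target pad) := by
  unfold Pre_get_pushes; infer_instance
def pvWitness_get_pushes : String × String × Bool := ("A", "0", false)
def Spec_get_pushes (current : String) (target : String) (pad : Bool) (out : String) : Prop := out = get_pushes_alt current target pad
instance (current : String) (target : String) (pad : Bool) (out : String) : Decidable (Spec_get_pushes current target pad out) := by unfold Spec_get_pushes; infer_instance

-- ===== CLAIM (what is proved, stated in full; the proofs are below) =====
def Claim_equal_get_pushes : Prop := ∀ (current : String) (target : String) (pad : Bool), Dom_get_pushes current target pad → Pre_get_pushes current target pad → Spec_get_pushes current target pad (get_pushes current target pad)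

-- ===== LEMMAS AND PROOFS =====
-- the claim is a finite statement: Pre_ confines current and target to the 5 (resp. 11) pad keys
theorem get_pushes_finite :
    ∀ (current target : String) (pad : Bool), Pre_get_pushes current target pad →
      get_pushes current target pad = get_pushes_alt current target pad := by
  intro current target pad h
  cases pad
  · simp only [Pre_get_pushes, if_neg, Bool.false_eq_true, not_false_iff, if_false] at h
    obtain ⟨h1, h2⟩ := h
    fin_cases h1 <;> fin_cases h2 <;> decide
  · simp only [Pre_get_pushes, if_true] at h
    obtain ⟨h1, h2⟩ := h
    fin_cases h1 <;> fin_cases h2 <;> decide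

-- ===== VERDICT (by name: the statement is the Claim_ definition above) =====
theorem get_pushes_spec : Claim_equal_get_pushes := by
  intro current target pad _ hpre
  exact get_pushes_finite current target pad hpre
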